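-- pv_equiv track=rewrite | github.com/AntonyDamico/grafos_django | src/tipos/hamilton.py | calcular_circuito
-- ===== SOURCE A (Python) =====
-- def encontrar_todos_caminos(grafo, inicio, final, camino=[]):
--     camino = camino + [inicio]
--     if inicio == final:
--         return [camino]
--     # if not grafo.has_key(start):
--     if not inicio in grafo:
--         return []
--     caminos = []
--     for nodo in grafo[inicio]:
--         if nodo not in camino:
--             nuevos_caminos = encontrar_todos_caminos(grafo, nodo, final, camino)
--             for nuevo_camino in nuevos_caminos:
--                 caminos.append(nuevo_camino)
--     return caminos
--
-- def calcular_circuito(grafo):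
--     ciclos = []
--     for nodo_inicio in grafo:
--         for nodo_final in grafo:
--             nuevos_caminos = encontrar_todos_caminos(grafo, nodo_inicio, nodo_final)
--             for camino in nuevos_caminos:
--                 if (len(camino) == len(grafo)):
--                     if camino[0] in grafo[camino[len(grafo)-1]]:
--                         # print camino[0], grafo[camino[len(grafo)-1]]
--                         camino.append(camino[0])
--                         ciclos.append(camino)
--     return ciclos
-- ===== SOURCE B (Python) =====
-- def _dfs(grafo, inicio, n, camino):
--     # all simple-path extensions of camino of length exactly n whose endpoint
--     # has an edge back to inicio, in DFS (adjacency-list) discovery order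
--     if len(camino) == n:
--         fin = camino[-1]
--         if fin in grafo and inicio in grafo[fin]:
--             return [camino]
--         return []
--     ultimo = camino[-1]
--     if ultimo not in grafo:
--         return []
--     res = []
--     for nodo in grafo[ultimo]:
--         if nodo not in camino:
--             res.extend(_dfs(grafo, inicio, n, camino + [nodo]))
--     return res
--
-- def calcular_circuito(grafo):
--     n = len(grafo)
--     ciclos = []
--     for inicio in grafo:
--         hallados = _dfs(grafo, inicio, n, [inicio])
--         for fin in grafo:
--             for camino in hallados:
--                 if camino[-1] == fin:
--                     ciclos.append(camino + [inicio])
--     return ciclos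
-- ===== Notes on version B (the rewrite author's own statement) =====
-- stated objective: faster
-- what changed: A re-runs a full simple-path DFS for every (start, end) key pair; B runs ONE depth-first enumeration of simple paths per start node, pruned at length n, and then groups the full-length hits by endpoint, returning the identical circuits in the identical order.
import Mathlib
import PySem

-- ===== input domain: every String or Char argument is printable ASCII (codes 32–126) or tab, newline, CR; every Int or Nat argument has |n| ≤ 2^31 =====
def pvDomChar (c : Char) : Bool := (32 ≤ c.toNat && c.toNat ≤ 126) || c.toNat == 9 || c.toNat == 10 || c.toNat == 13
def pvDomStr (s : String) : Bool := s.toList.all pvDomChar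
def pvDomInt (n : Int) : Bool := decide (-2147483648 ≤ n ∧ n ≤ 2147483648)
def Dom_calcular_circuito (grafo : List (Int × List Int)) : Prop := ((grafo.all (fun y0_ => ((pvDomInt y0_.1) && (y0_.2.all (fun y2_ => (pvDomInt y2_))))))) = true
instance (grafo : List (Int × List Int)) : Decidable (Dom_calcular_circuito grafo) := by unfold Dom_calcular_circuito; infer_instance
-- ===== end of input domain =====

-- B replaces A's per-(start,end) re-enumeration of all simple paths by ONE depth-first
-- enumeration per start node whose full-length hits are then grouped by endpoint
-- (objective: faster — n DFS runs instead of n² per graph).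

-- termination measure helpers for the two DFS recursions (cited in decreasing_by)
def pvK (g : PySem.Dict Int (List Int)) (c : List Int) : Nat :=
  (g.keys.filter (fun x => decide (x ∉ c))).length

theorem pvFilterLt {l c : List Int} {a : Int} (hal : a ∈ l) (hac : a ∉ c) :
    (l.filter (fun x => decide (x ∉ c ++ [a]))).length < (l.filter (fun x => decide (x ∉ c))).length := by
  induction l with
  | nil => cases hal
  | cons x t ih =>
    have hle : (t.filter (fun x => decide (x ∉ c ++ [a]))).length ≤ (t.filter (fun x => decide (x ∉ c))).length := by
      apply List.Sublist.length_le
      apply List.monotone_filter_right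
      intro y hy
      simp only [decide_eq_true_eq, List.mem_append, List.mem_singleton, not_or] at hy ⊢
      exact hy.1
    by_cases hxa : x = a
    · subst hxa
      simp only [List.filter_cons]
      have h1 : (decide (x ∉ c ++ [x])) = false := by simp
      have h2 : (decide (x ∉ c)) = true := by simp [hac]
      rw [h1, h2]
      simp only [Bool.false_eq_true, if_false, if_true, List.length_cons]
      omega
    · have hal' : a ∈ t := by
        rcases List.mem_cons.mp hal with h | h
        · exact absurd h.symm hxa
        · exact h
      simp only [List.filter_cons]
      have hd : (decide (x ∉ c ++ [a])) = (decide (x ∉ c)) := by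
        simp [hxa]
      rw [hd]
      cases hv : decide (x ∉ c)
      · exact ih hal'
      · simpa using ih hal'

theorem pvK_lt (g : PySem.Dict Int (List Int)) {c : List Int} {a : Int}
    (ha : g.contains a = true) (hac : a ∉ c) : pvK g (c ++ [a]) < pvK g c :=
  pvFilterLt ((PySem.Dict.contains_iff_mem_keys g a).mp ha) hac

theorem pvK_eq_of_mem (g : PySem.Dict Int (List Int)) {c : List Int} {a : Int}
    (hac : a ∈ c) : pvK g (c ++ [a]) = pvK g c := by
  unfold pvK
  congr 1
  apply List.filter_congr
  intro x _
  by_cases hx : x ∈ c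
  · simp [hx]
  · simp only [List.mem_append, List.mem_singleton, not_or]
    simp only [hx]
    have : x ≠ a := fun h => hx (h ▸ hac)
    simp [this]

theorem pvK_eq_of_not_contains (g : PySem.Dict Int (List Int)) {c : List Int} {a : Int}
    (ha : g.contains a = false) : pvK g (c ++ [a]) = pvK g c := by
  unfold pvK
  congr 1
  apply List.filter_congr
  intro x hx
  have hxa : x ≠ a := by
    intro h; subst h
    rw [(PySem.Dict.contains_iff_mem_keys g x).symm] at hx
    simp [hx] at ha
  by_cases hxc : x ∈ c
  · simp [hxc]
  · simp [hxc, hxa]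

theorem pvGetNeg1 (l : List Int) (a : Int) : PySem.List.pyGet? (l ++ [a]) (-1) = some a := by
  simp [PySem.List.pyGet?, PySem.List.pyIdx?]

-- ===== PORT A =====
-- paths are simple: a node already on 'camino' is never revisited
def encontrar_todos_caminos (g : PySem.Dict Int (List Int)) (inicio final : Int)
    (camino : List Int) : List (List Int) :=
  let camino' := camino ++ [inicio]
  if inicio = final then [camino']
  else if hni : g.contains inicio = false then []
  else (g.getD inicio []).foldl
    (fun caminos nodo =>
      if hn : nodo ∉ camino' then caminos ++ encontrar_todos_caminos g nodo final camino'
      else caminos) []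
termination_by (pvK g camino, if inicio ∈ camino then 1 else 0)
decreasing_by
  by_cases hm : inicio ∈ camino
  · rw [pvK_eq_of_mem g hm, if_neg hn, if_pos hm]
    exact Prod.Lex.right _ (by omega)
  · exact Prod.Lex.left _ _ (pvK_lt g (by revert hni; cases g.contains inicio <;> simp) hm)

-- A's innermost loop body: keep camino iff it has full length and closes a cycle.
-- camino[0] / camino[len(grafo)-1] / grafo[...] never fail here: every found camino is
-- a nonempty list ending at the key nodo_final
def pvCicloStep (g : PySem.Dict Int (List Int)) (ciclos : List (List Int))
    (camino : List Int) : List (List Int) :=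
  if camino.length = g.size then
    match PySem.List.pyGet? camino 0, PySem.List.pyGet? camino ((g.size : Int) - 1) with
    | some h, some t => if h ∈ g.getD t [] then ciclos ++ [camino ++ [h]] else ciclos
    | _, _ => ciclos
  else ciclos

def calcular_circuito (grafo : List (Int × List Int)) : List (List Int) :=
  let g := PySem.Dict.ofList grafo
  g.keys.foldl (fun ciclos nodo_inicio =>
    g.keys.foldl (fun ciclos nodo_final =>
      (encontrar_todos_caminos g nodo_inicio nodo_final []).foldl (pvCicloStep g) ciclos)
      ciclos) []

-- ===== PORT B =====
-- single DFS from 'inicio': all simple-path extensions of camino of length exactly n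
-- whose endpoint has an edge back to inicio, in discovery order
def pvDfs (g : PySem.Dict Int (List Int)) (inicio : Int) (n : Nat)
    (camino : List Int) : List (List Int) :=
  if camino.length = n then
    match PySem.List.pyGet? camino (-1) with   -- camino is never empty here
    | some fin => if g.contains fin = true ∧ inicio ∈ g.getD fin [] then [camino] else []
    | none => []
  else
    match h2 : PySem.List.pyGet? camino (-1) with   -- camino is never empty here
    | none => []
    | some ultimo =>
      if hcu : g.contains ultimo = false then []
      else (g.getD ultimo []).foldl
        (fun res nodo =>
          if hn : nodo ∉ camino then res ++ pvDfs g inicio n (camino ++ [nodo]) else res) []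
termination_by (pvK g camino,
  match PySem.List.pyGet? camino (-1) with
  | some u => if g.contains u = true then 1 else 0
  | none => 0)
decreasing_by
  by_cases hcn : g.contains nodo = true
  · exact Prod.Lex.left _ _ (pvK_lt g hcn hn)
  · have hcf : g.contains nodo = false := by revert hcn; cases g.contains nodo <;> simp
    have hct : g.contains ultimo = true := by revert hcu; cases g.contains ultimo <;> simp
    rw [pvK_eq_of_not_contains g hcf, pvGetNeg1, h2]
    exact Prod.Lex.right _ (by simp [hcf, hct])


-- B's innermost loop body: append the paths ending at fin, closed into circuits.
-- camino[-1] never fails: every found path is nonempty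
def pvRecogerStep (inicio fin : Int) (ciclos : List (List Int))
    (camino : List Int) : List (List Int) :=
  if PySem.List.pyGet? camino (-1) = some fin then ciclos ++ [camino ++ [inicio]]
  else ciclos

def calcular_circuito_alt (grafo : List (Int × List Int)) : List (List Int) :=
  let g := PySem.Dict.ofList grafo
  let n := g.size
  g.keys.foldl (fun ciclos inicio =>
    let hallados := pvDfs g inicio n [inicio]
    g.keys.foldl (fun ciclos fin =>
      hallados.foldl (pvRecogerStep inicio fin) ciclos) ciclos) []

-- ===== PRECONDITION & SPEC =====
def Spec_calcular_circuito (grafo : List (Int × List Int)) (out : List (List Int)) : Prop := out = calcular_circuito_alt grafo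
instance (grafo : List (Int × List Int)) (out : List (List Int)) : Decidable (Spec_calcular_circuito grafo out) := by unfold Spec_calcular_circuito; infer_instance

-- ===== CLAIM (what is proved, stated in full; the proofs are below) =====
def Claim_equal_calcular_circuito : Prop := ∀ (grafo : List (Int × List Int)), Dom_calcular_circuito grafo → Spec_calcular_circuito grafo (calcular_circuito grafo)

-- ===== LEMMAS AND PROOFS =====

theorem pvGetNeg1' (l : List Int) (h : l ≠ []) : PySem.List.pyGet? l (-1) = l.getLast? := by
  rcases List.eq_nil_or_concat l with rfl | ⟨t, a, rfl⟩
  · simp at h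
  · rw [List.concat_eq_append, pvGetNeg1]; simp

theorem pvGet0 (a : Int) (l : List Int) : PySem.List.pyGet? (a :: l) 0 = some a := by
  simp [PySem.List.pyGet?, PySem.List.pyIdx?]

-- the Bool test A's inner loop applies to a found path, and what it appends
def pAb (g : PySem.Dict Int (List Int)) (c : List Int) : Bool :=
  decide (c.length = g.size) &&
    (match PySem.List.pyGet? c 0, PySem.List.pyGet? c ((g.size : Int) - 1) with
     | some h, some t => decide (h ∈ g.getD t [])
     | _, _ => false)

def fA (c : List Int) : List Int := c ++ [(PySem.List.pyGet? c 0).getD 0]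

-- the Bool test B's inner loop applies ("this path ends at fin")
def pBb (E : Int) (c : List Int) : Bool := decide (PySem.List.pyGet? c (-1) = some E)

theorem pvFoldlGuard {α β : Type} (L : List α) (P : α → Prop) [DecidablePred P]
    (f : α → List β) (acc : List β) :
    L.foldl (fun a x => if P x then a ++ f x else a) acc
      = acc ++ L.flatMap (fun x => if P x then f x else []) := by
  have he : (fun (a : List β) x => if P x then a ++ f x else a)
      = fun a x => a ++ (if P x then f x else []) := by
    funext a x; split <;> simp
  rw [he, PySem.List.foldl_append_eq_flatMap]

theorem pvGetLenM1 (l : List Int) (h : l ≠ []) :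
    PySem.List.pyGet? l ((l.length : Int) - 1) = l.getLast? := by
  have hl : 0 < l.length := List.length_pos_iff.mpr h
  have he : ((l.length : Int) - 1) = ((l.length - 1 : Nat) : Int) := by omega
  rw [he, PySem.List.pyGet?_natCast, List.getLast?_eq_getElem?]

-- A's DFS: every returned path extends camino ++ [inicio] and ends at final
theorem pthA (g : PySem.Dict Int (List Int)) :
    ∀ (N : Nat) (camino : List Int) (v E : Int) (p : List Int),
      2 * pvK g (camino ++ [v]) + (if g.contains v = true then 1 else 0) ≤ N →
      p ∈ encontrar_todos_caminos g v E camino →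
      (∃ r, p = (camino ++ [v]) ++ r) ∧ p.getLast? = some E := by
  intro N
  induction N using Nat.strong_induction_on with
  | _ N IH =>
    intro camino v E p hN hp
    rw [encontrar_todos_caminos] at hp
    by_cases hve : v = E
    · simp only [if_pos hve] at hp
      rw [List.mem_singleton] at hp
      subst hp
      exact ⟨⟨[], by simp⟩, by simp [hve]⟩
    · rw [if_neg hve] at hp
      by_cases hcv : g.contains v = false
      · rw [dif_pos hcv] at hp
        simp at hp
      · rw [dif_neg hcv] at hp
        simp only [dite_eq_ite] at hp
        rw [pvFoldlGuard] at hp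
        simp only [List.nil_append, List.mem_flatMap] at hp
        obtain ⟨nodo, _, hp⟩ := hp
        split at hp
        · rename_i hn
          have hcvt : g.contains v = true := by revert hcv; cases g.contains v <;> simp
          rw [hcvt, if_pos rfl] at hN
          have hM' : 2 * pvK g ((camino ++ [v]) ++ [nodo]) +
              (if g.contains nodo = true then 1 else 0) < N := by
            by_cases hcn : g.contains nodo = true
            · have := pvK_lt g hcn hn
              rw [if_pos hcn]; omega
            · have hcnf : g.contains nodo = false := by revert hcn; cases g.contains nodo <;> simp
              have := pvK_eq_of_not_contains g (c := camino ++ [v]) hcnf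
              rw [if_neg hcn]; omega
          obtain ⟨⟨r, hr⟩, hlast⟩ := IH _ hM' (camino ++ [v]) nodo E p le_rfl hp
          exact ⟨⟨nodo :: r, by simp [hr]⟩, hlast⟩
        · simp at hp

-- B's DFS: every returned path has length n, extends camino, and (unless it IS
-- camino) ends at a node not on camino
theorem pthB (g : PySem.Dict Int (List Int)) (s : Int) (n : Nat) :
    ∀ (N : Nat) (camino : List Int) (p : List Int), camino ≠ [] →
      2 * pvK g camino +
        (match PySem.List.pyGet? camino (-1) with
         | some u => if g.contains u = true then 1 else 0
         | none => 0) ≤ N →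
      p ∈ pvDfs g s n camino →
      p.length = n ∧ ∃ r, p = camino ++ r ∧
        (r = [] ∨ ∃ u, p.getLast? = some u ∧ u ∉ camino) := by
  intro N
  induction N using Nat.strong_induction_on with
  | _ N IH =>
    intro camino p hne hN hp
    rw [pvDfs] at hp
    by_cases hlen : camino.length = n
    · rw [if_pos hlen] at hp
      rw [pvGetNeg1' camino hne] at hp
      split at hp
      · rename_i heq
        split at hp
        · rw [List.mem_singleton] at hp
          subst hp
          exact ⟨hlen, [], by simp⟩
        · simp at hp
      · simp at hp
    · rw [if_neg hlen] at hp
      rw [pvGetNeg1' camino hne] at hp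
      split at hp
      case _ => simp at hp
      case _ ultimo hlast =>
        by_cases hcu : g.contains ultimo = false
        · rw [dif_pos hcu] at hp; simp at hp
        · rw [dif_neg hcu] at hp
          simp only [dite_eq_ite] at hp
          rw [pvFoldlGuard] at hp
          simp only [List.nil_append, List.mem_flatMap] at hp
          obtain ⟨nodo, _, hp⟩ := hp
          split at hp
          · rename_i hn
            have hcut : g.contains ultimo = true := by revert hcu; cases g.contains ultimo <;> simp
            rw [pvGetNeg1' camino hne, hlast] at hN
            have hN' : 2 * pvK g camino + 1 ≤ N := by simpa [hcut] using hN
            have hM' : 2 * pvK g (camino ++ [nodo]) +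
                (match PySem.List.pyGet? (camino ++ [nodo]) (-1) with
                 | some u => if g.contains u = true then 1 else 0
                 | none => 0) < N := by
              rw [pvGetNeg1]
              show 2 * pvK g (camino ++ [nodo]) + (if g.contains nodo = true then 1 else 0) < N
              by_cases hcn : g.contains nodo = true
              · have hlt := pvK_lt g hcn hn
                rw [if_pos hcn]; omega
              · have hcnf : g.contains nodo = false := by revert hcn; cases g.contains nodo <;> simp
                have heq := pvK_eq_of_not_contains g (c := camino) hcnf
                rw [if_neg hcn]; omega
            obtain ⟨hl, r, hr, hor⟩ := IH _ hM' (camino ++ [nodo]) p (by simp) le_rfl hp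
            refine ⟨hl, nodo :: r, by simp [hr], Or.inr ?_⟩
            rcases hor with rfl | ⟨u, hu, hun⟩
            · refine ⟨nodo, ?_, hn⟩
              rw [hr]; simp
            · exact ⟨u, hu, fun hc => hun (List.mem_append_left _ hc)⟩
          · simp at hp

-- the heart: A's per-endpoint DFS, filtered by A's length/edge test, finds the
-- same paths in the same order as B's single DFS filtered by endpoint
theorem pvMain (g : PySem.Dict Int (List Int)) (s : Int) :
    ∀ (N : Nat) (camino : List Int) (v E : Int),
      2 * pvK g (camino ++ [v]) + (if g.contains v = true then 1 else 0) ≤ N →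
      (camino ++ [v]).head? = some s →
      (encontrar_todos_caminos g v E camino).filter (pAb g)
        = (pvDfs g s g.size (camino ++ [v])).filter (pBb E) := by
  intro N
  induction N using Nat.strong_induction_on with
  | _ N IH =>
    intro camino v E hN hhead
    have hcamne : camino ++ [v] ≠ [] := by simp
    obtain ⟨t, ht⟩ := List.head?_eq_some_iff.mp hhead
    have hget0 : PySem.List.pyGet? (camino ++ [v]) 0 = some s := by rw [ht, pvGet0]
    have hlastv : (camino ++ [v]).getLast? = some v := by simp
    rw [encontrar_todos_caminos, pvDfs]
    by_cases hve : v = E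
    · subst hve
      rw [if_pos (show v = v from rfl)]
      by_cases hlen : (camino ++ [v]).length = g.size
      · rw [if_pos hlen]; simp only [pvGetNeg1]
        have hB : pBb v (camino ++ [v]) = true := by
          unfold pBb
          rw [pvGetNeg1]
          simp
        by_cases hmem : s ∈ g.getD v []
        · have hcv : g.contains v = true := by
            by_contra hc
            have hcf : g.contains v = false := by revert hc; cases g.contains v <;> simp
            rw [PySem.Dict.getD_of_not_contains g [] hcf] at hmem
            simp at hmem
          have hco : g.contains v = true ∧ s ∈ g.getD v [] := ⟨hcv, hmem⟩
          rw [if_pos hco]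
          have hApos : pAb g (camino ++ [v]) = true := by
            unfold pAb
            rw [← hlen, pvGetLenM1 _ hcamne, hget0, hlastv]
            simp [hmem]
          rw [List.filter_singleton, List.filter_singleton, hApos, hB]
        · have hco : ¬(g.contains v = true ∧ s ∈ g.getD v []) := fun hc => hmem hc.2
          rw [if_neg hco]
          have hAneg : pAb g (camino ++ [v]) = false := by
            unfold pAb
            rw [← hlen, pvGetLenM1 _ hcamne, hget0, hlastv]
            simp [hmem]
          rw [List.filter_singleton, hAneg]
          simp
      · rw [if_neg hlen]
        have hAneg : pAb g (camino ++ [v]) = false := by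
          unfold pAb
          rw [decide_eq_false hlen, Bool.false_and]
        split
        · rename_i heq
          rw [pvGetNeg1] at heq
          simp at heq
        · rename_i u heq
          rw [pvGetNeg1] at heq
          injection heq with heq
          subst heq
          by_cases hcv : g.contains v = false
          · rw [dif_pos hcv, List.filter_singleton, hAneg]
            simp
          · rw [dif_neg hcv]
            simp only [dite_eq_ite]
            rw [pvFoldlGuard, List.nil_append, List.filter_singleton, hAneg]
            simp only [cond_false]
            symm
            rw [List.filter_eq_nil_iff]
            intro p hp
            rw [List.mem_flatMap] at hp
            obtain ⟨nodo, _, hp⟩ := hp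
            split at hp
            · rename_i hn
              obtain ⟨_, r, hr, hor⟩ := pthB g s g.size _ (camino ++ [v] ++ [nodo]) p (by simp) le_rfl hp
              have hpne : p ≠ [] := by rw [hr]; simp
              obtain ⟨u, hu, hun⟩ : ∃ u, p.getLast? = some u ∧ u ∉ camino ++ [v] := by
                rcases hor with rfl | ⟨u, hu, hun⟩
                · exact ⟨nodo, by rw [hr]; simp, hn⟩
                · exact ⟨u, hu, fun hc => hun (List.mem_append_left _ hc)⟩
              unfold pBb
              rw [pvGetNeg1' p hpne, hu]
              simp only [decide_eq_true_eq, Option.some.injEq]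
              intro hc
              exact hun (by simp [hc])
            · simp at hp
    · rw [if_neg hve]
      by_cases hcv : g.contains v = false
      · rw [dif_pos hcv]
        by_cases hlen : (camino ++ [v]).length = g.size
        · rw [if_pos hlen]; simp only [pvGetNeg1]
          have hco : ¬(g.contains v = true ∧ s ∈ g.getD v []) := by
            rintro ⟨hc, -⟩
            rw [hcv] at hc
            exact Bool.false_ne_true hc
          rw [if_neg hco]
          simp
        · rw [if_neg hlen]
          split
          · rename_i heq
            rw [pvGetNeg1] at heq
            simp at heq
          · rename_i u heq
            rw [pvGetNeg1] at heq
            injection heq with heq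
            subst heq
            rw [dif_pos hcv]
            simp
      · rw [dif_neg hcv]
        have hcvt : g.contains v = true := by revert hcv; cases g.contains v <;> simp
        rw [hcvt, if_pos rfl] at hN
        simp only [dite_eq_ite]
        rw [pvFoldlGuard, List.nil_append]
        by_cases hlen : (camino ++ [v]).length = g.size
        · rw [if_pos hlen]; simp only [pvGetNeg1]
          have hLHS : (List.flatMap
              (fun nodo => if nodo ∉ camino ++ [v]
                then encontrar_todos_caminos g nodo E (camino ++ [v]) else [])
              (g.getD v [])).filter (pAb g) = [] := by
            rw [List.filter_eq_nil_iff]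
            intro p hp
            rw [List.mem_flatMap] at hp
            obtain ⟨nodo, _, hp⟩ := hp
            split at hp
            · obtain ⟨⟨r, hr⟩, _⟩ := pthA g _ (camino ++ [v]) nodo E p le_rfl hp
              have hplen : (camino ++ [v]).length + 1 ≤ p.length := by
                rw [hr]; simp
              unfold pAb
              simp only [Bool.and_eq_true, decide_eq_true_eq, not_and]
              intro hpl
              omega
            · simp at hp
          rw [hLHS]
          split
          · rw [List.filter_singleton]
            have hpb : pBb E (camino ++ [v]) = false := by
              unfold pBb
              rw [pvGetNeg1]
              simpa using hve
            rw [hpb]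
            rfl
          · rfl
        · rw [if_neg hlen]
          split
          · rename_i heq
            rw [pvGetNeg1] at heq
            simp at heq
          · rename_i u heq
            rw [pvGetNeg1] at heq
            injection heq with heq
            subst heq
            rw [if_neg hcv]
            rw [pvFoldlGuard, List.nil_append]
            rw [List.filter_flatMap, List.filter_flatMap]
            apply List.flatMap_congr
            intro nodo _
            by_cases hn : nodo ∉ camino ++ [v]
            · rw [if_pos hn, if_pos hn]
              have hM' : 2 * pvK g ((camino ++ [v]) ++ [nodo]) +
                  (if g.contains nodo = true then 1 else 0) < N := by
                by_cases hcn : g.contains nodo = true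
                · have hlt := pvK_lt g hcn hn
                  rw [if_pos hcn]; omega
                · have hcnf : g.contains nodo = false := by revert hcn; cases g.contains nodo <;> simp
                  have heq := pvK_eq_of_not_contains g (c := camino ++ [v]) hcnf
                  rw [if_neg hcn]; omega
              exact IH _ hM' (camino ++ [v]) nodo E le_rfl
                (by rw [List.head?_append_of_ne_nil _ hcamne, hhead])
            · rw [if_neg hn, if_neg hn]
              simp

theorem pvChunk (g : PySem.Dict Int (List Int)) (s E : Int) :
    ((encontrar_todos_caminos g s E []).filter (pAb g)).map fA
      = ((pvDfs g s g.size [s]).filter (pBb E)).map (· ++ [s]) := by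
  have hmain := pvMain g s
    (2 * pvK g ([] ++ [s]) + (if g.contains s = true then 1 else 0)) [] s E le_rfl (by simp)
  simp only [List.nil_append] at hmain
  rw [hmain]
  apply List.map_congr_left
  intro p hp
  have hp' := List.mem_of_mem_filter hp
  obtain ⟨-, r, hr, -⟩ := pthB g s g.size
    (2 * pvK g [s] + (match PySem.List.pyGet? [s] (-1) with
      | some u => if g.contains u = true then 1 else 0
      | none => 0)) [s] p (by simp) le_rfl hp'
  rw [hr, List.singleton_append]
  unfold fA
  rw [pvGet0]
  rfl

theorem pvCicloStep_eq (g : PySem.Dict Int (List Int)) :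
    pvCicloStep g = fun ciclos c => if pAb g c = true then ciclos ++ [fA c] else ciclos := by
  funext ciclos c
  unfold pvCicloStep pAb fA
  by_cases hl : c.length = g.size
  · rw [if_pos hl]
    cases h0 : PySem.List.pyGet? c 0 with
    | none => simp
    | some h =>
      cases h1 : PySem.List.pyGet? c ((g.size : Int) - 1) with
      | none => simp
      | some u =>
        by_cases hm : h ∈ g.getD u []
        · simp [hm, hl]
        · simp [hm, hl]
  · rw [if_neg hl]
    simp [hl]

theorem pvRecogerStep_eq (inicio fin : Int) :
    pvRecogerStep inicio fin
      = fun ciclos c => if pBb fin c = true then ciclos ++ [c ++ [inicio]] else ciclos := by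
  funext ciclos c
  unfold pvRecogerStep pBb
  by_cases h : PySem.List.pyGet? c (-1) = some fin
  · simp [h]
  · simp [h]

-- ===== VERDICT (by name: the statement is the Claim_ definition above) =====
theorem calcular_circuito_spec : Claim_equal_calcular_circuito := by
  intro grafo _
  unfold Spec_calcular_circuito calcular_circuito calcular_circuito_alt
  simp only [pvCicloStep_eq, pvRecogerStep_eq, PySem.List.foldl_append_if,
    PySem.List.foldl_append_eq_flatMap, List.nil_append]
  apply List.flatMap_congr
  intro s _
  apply List.flatMap_congr
  intro E _
  exact pvChunk (PySem.Dict.ofList grafo) s E
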